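-- pv_equiv track=rewrite | github.com/eiriksteen/kvasir | data_structures/src/synesis_data_structures/time_series/validation.py | _is_snake_case
-- ===== SOURCE A (Python) =====
-- def _is_snake_case(text: str) -> bool:
--     """Check if a string follows snake_case naming convention."""
--     if not text or text.startswith('_') or text.endswith('_'):
--         return False
--
--     # Check for consecutive underscores
--     if '__' in text:
--         return False
--
--     # Check for uppercase letters (should be lowercase in snake_case)
--     if any(c.isupper() for c in text):
--         return False
--
--     # Check for spaces or other non-alphanumeric characters except underscores
--     if any(c not in 'abcdefghijklmnopqrstuvwxyz0123456789_' for c in text.lower()):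
--         return False
--
--     return True
-- ===== SOURCE B (Python) =====
-- def _is_snake_case(text: str) -> bool:
--     """Single-pass DFA: track whether the previous position was an underscore
--     (or the start); reject immediately on a bad char or a misplaced underscore."""
--     prev_underscore = True  # start of string: an underscore may not follow
--     for c in text:
--         if c == '_':
--             if prev_underscore:
--                 return False
--             prev_underscore = True
--         elif c in 'abcdefghijklmnopqrstuvwxyz0123456789':
--             prev_underscore = False
--         else:
--             return False
--     return not prev_underscore
-- ===== Notes on version B (the rewrite author's own statement) =====
-- stated objective: faster
-- what changed: Replaced A's four separate linear scans (prefix/suffix tests, a double-underscore substring search, an uppercase scan and a membership scan over text.lower()) with one single-pass DFA that tracks whether the previous position was an underscore and returns early on the first violation.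
import Mathlib
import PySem

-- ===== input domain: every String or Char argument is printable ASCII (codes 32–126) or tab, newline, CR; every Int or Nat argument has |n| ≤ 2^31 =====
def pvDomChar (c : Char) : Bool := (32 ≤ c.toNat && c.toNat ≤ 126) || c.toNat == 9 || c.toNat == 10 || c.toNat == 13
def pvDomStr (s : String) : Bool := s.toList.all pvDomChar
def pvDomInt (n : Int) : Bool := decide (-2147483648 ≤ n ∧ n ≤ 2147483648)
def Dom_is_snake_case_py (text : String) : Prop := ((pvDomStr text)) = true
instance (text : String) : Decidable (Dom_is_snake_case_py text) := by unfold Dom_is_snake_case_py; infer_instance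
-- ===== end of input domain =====

-- B replaces A's four separate scans (prefix/suffix/'__'/charset checks) by one single-pass
-- DFA with early exit; same return value on the whole domain.

-- ===== PORT A =====
-- A's charset literal 'abcdefghijklmnopqrstuvwxyz0123456789_' as a char list
def pvSnakeChars : List Char := "abcdefghijklmnopqrstuvwxyz0123456789_".toList

def is_snake_case_py (text : String) : Bool :=
  -- if not text or text.startswith('_') or text.endswith('_'): return False
  if text.toList.isEmpty || PySem.Str.startswith text "_" || PySem.Str.endswith text "_" then false
  -- if '__' in text: return False
  else if PySem.Str.isIn "__" text then false
  -- if any(c.isupper() for c in text): return False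
  else if text.toList.any (fun c => PySem.Chars.isupper c) then false
  -- if any(c not in '…_' for c in text.lower()): return False   (single-char 'c in s' = membership)
  else if (PySem.Str.lower text).toList.any (fun c => !(PySem.Chars.isIn [c] pvSnakeChars)) then false
  else true

-- ===== PORT B =====
-- B's charset literal 'abcdefghijklmnopqrstuvwxyz0123456789'
def pvLcd : List Char := "abcdefghijklmnopqrstuvwxyz0123456789".toList

-- the for-loop of Source B; `prev` = prev_underscore, early returns are the `false` branches
def pvAltGo : List Char → Bool → Bool
  | [], prev => !prev
  | c :: rest, prev =>
    if c = '_' then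
      if prev then false else pvAltGo rest true
    else if pvLcd.contains c then
      pvAltGo rest false
    else false

def is_snake_case_py_alt (text : String) : Bool := pvAltGo text.toList true

-- ===== PRECONDITION & SPEC =====
def Spec_is_snake_case_py (text : String) (out : Bool) : Prop := out = is_snake_case_py_alt text
instance (text : String) (out : Bool) : Decidable (Spec_is_snake_case_py text out) := by unfold Spec_is_snake_case_py; infer_instance

-- ===== CLAIM (what is proved, stated in full; the proofs are below) =====
def Claim_equal_is_snake_case_py : Prop := ∀ (text : String), Dom_is_snake_case_py text → Spec_is_snake_case_py text (is_snake_case_py text)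

-- ===== LEMMAS AND PROOFS =====

theorem singleton_prefix_iff_head? {c : Char} {l : List Char} :
    [c] <+: l ↔ l.head? = some c := by
  cases l with
  | nil => simp
  | cons a t => simp [List.cons_prefix_cons, eq_comm]

theorem singleton_suffix_iff_getLast? {c : Char} {l : List Char} :
    [c] <:+ l ↔ l.getLast? = some c := by
  constructor
  · rintro ⟨t, rfl⟩; exact List.getLast?_concat
  · intro h
    rcases List.getLast?_eq_some_iff.mp h with ⟨ys, rfl⟩
    exact ⟨ys, rfl⟩

theorem getLast?_cons_eq {c : Char} {l : List Char} :
    (c :: l).getLast? = if l = [] then some c else l.getLast? := by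
  cases l <;> simp

-- characterization of B's loop
theorem pvAltGo_iff (cs : List Char) (prev : Bool) :
    pvAltGo cs prev = true ↔
      ((∀ c ∈ cs, c = '_' ∨ c ∈ pvLcd) ∧ ¬ (['_', '_'] <:+: cs) ∧
       (prev = true → cs.head? ≠ some '_') ∧ cs.getLast? ≠ some '_' ∧
       (cs = [] → prev = false)) := by
  induction cs generalizing prev with
  | nil => cases prev <;> simp [pvAltGo]
  | cons c rest ih =>
    by_cases hc : c = '_'
    · subst hc
      cases prev with
      | true => simp [pvAltGo]
      | false =>
        rw [show pvAltGo ('_' :: rest) false = pvAltGo rest true by simp [pvAltGo], ih]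
        constructor
        · rintro ⟨h1, h2, h3, h4, h5⟩
          refine ⟨?_, ?_, by simp, ?_, by simp⟩
          · intro x hx
            rcases List.mem_cons.mp hx with rfl | hx
            · exact Or.inl rfl
            · exact h1 x hx
          · rw [List.infix_cons_iff]
            rintro (hp | hi)
            · rw [List.cons_prefix_cons] at hp
              exact (h3 rfl) (singleton_prefix_iff_head?.mp hp.2)
            · exact h2 hi
          · rw [getLast?_cons_eq]
            split
            · exact absurd (h5 (by assumption)) (by simp)
            · exact h4
        · rintro ⟨h1, h2, _, h4, _⟩
          rw [List.infix_cons_iff] at h2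
          push_neg at h2
          rw [getLast?_cons_eq] at h4
          by_cases hr : rest = []
          · simp [hr] at h4
          · refine ⟨fun x hx => h1 x (List.mem_cons_of_mem _ hx), h2.2, ?_, by simpa [hr] using h4, fun h => absurd h hr⟩
            intro _ hh
            exact h2.1 (List.cons_prefix_cons.mpr ⟨rfl, singleton_prefix_iff_head?.mpr hh⟩)
    · by_cases hm : c ∈ pvLcd
      · rw [show pvAltGo (c :: rest) prev = pvAltGo rest false by simp [pvAltGo, hc, hm], ih]
        constructor
        · rintro ⟨h1, h2, _, h4, _⟩
          refine ⟨?_, ?_, ?_, ?_, by simp⟩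
          · intro x hx
            rcases List.mem_cons.mp hx with rfl | hx
            · exact Or.inr hm
            · exact h1 x hx
          · rw [List.infix_cons_iff]
            rintro (hp | hi)
            · rw [List.cons_prefix_cons] at hp
              exact hc hp.1.symm
            · exact h2 hi
          · intro _ hh
            simp at hh
            exact hc hh
          · rw [getLast?_cons_eq]
            split
            · simp; exact fun h => hc h
            · exact h4
        · rintro ⟨h1, h2, _, h4, _⟩
          rw [List.infix_cons_iff] at h2
          push_neg at h2
          rw [getLast?_cons_eq] at h4
          refine ⟨fun x hx => h1 x (List.mem_cons_of_mem _ hx), h2.2, by simp, ?_, by simp⟩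
          by_cases hr : rest = []
          · simp [hr]
          · simpa [hr] using h4
      · constructor
        · intro h
          exfalso
          simp only [pvAltGo, if_neg hc] at h
          rw [if_neg (by simpa using hm)] at h
          exact Bool.false_ne_true h
        · rintro ⟨h1, _⟩
          rcases h1 c (List.mem_cons_self) with h | h
          · exact absurd h hc
          · exact absurd h hm

-- characterization of A (on the char list)
theorem is_snake_case_py_iff (text : String) :
    is_snake_case_py text = true ↔
      (text.toList ≠ [] ∧ text.toList.head? ≠ some '_' ∧ text.toList.getLast? ≠ some '_' ∧
       ¬ (['_', '_'] <:+: text.toList) ∧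
       ∀ c ∈ text.toList, PySem.Chars.isupper c = false ∧ PySem.Chars.lowerChar c ∈ pvSnakeChars) := by
  have e1 : ("_" : String).toList = ['_'] := rfl
  have e2 : ("__" : String).toList = ['_', '_'] := rfl
  have hs : PySem.Str.startswith text "_" = true ↔ text.toList.head? = some '_' := by
    rw [PySem.Str.startswith_eq, PySem.Chars.startswith_iff, e1, singleton_prefix_iff_head?]
  have he : PySem.Str.endswith text "_" = true ↔ text.toList.getLast? = some '_' := by
    rw [PySem.Str.endswith_eq, PySem.Chars.endswith_iff, e1, singleton_suffix_iff_getLast?]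
  have hin : PySem.Str.isIn "__" text = true ↔ ['_', '_'] <:+: text.toList := by
    rw [PySem.Str.isIn_eq, PySem.Chars.isIn_iff_infix, e2]
  have hlow : ((PySem.Str.lower text).toList.any
        (fun c => !(PySem.Chars.isIn [c] pvSnakeChars)) = true) ↔
      ∃ c ∈ text.toList, PySem.Chars.lowerChar c ∉ pvSnakeChars := by
    rw [PySem.Str.toList_lower]
    show (List.map PySem.Chars.lowerChar text.toList).any _ = true ↔ _
    simp [List.any_map, Function.comp_def, PySem.Chars.isIn_eq_false_iff,
      List.singleton_infix_iff]
  unfold is_snake_case_py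
  split_ifs with h1 h2 h3 h4
  · constructor
    · intro h; exact absurd h (by simp)
    · rintro ⟨hn, hh, hl, -, -⟩
      simp only [Bool.or_eq_true] at h1
      rcases h1 with (h | h) | h
      · exact hn (List.isEmpty_iff.mp h)
      · exact hh (hs.mp h)
      · exact hl (he.mp h)
  · rw [hin] at h2
    constructor
    · intro h; exact absurd h (by simp)
    · rintro ⟨-, -, -, hi, -⟩; exact hi h2
  · simp only [List.any_eq_true] at h3
    constructor
    · intro h; exact absurd h (by simp)
    · rintro ⟨-, -, -, -, hch⟩
      rcases h3 with ⟨c, hc, hup⟩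
      rw [(hch c hc).1] at hup
      exact Bool.false_ne_true hup
  · rw [hlow] at h4
    constructor
    · intro h; exact absurd h (by simp)
    · rintro ⟨-, -, -, -, hch⟩
      rcases h4 with ⟨c, hc, hbad⟩
      exact hbad (hch c hc).2
  · rw [hin] at h2
    simp only [List.any_eq_true, not_exists, not_and] at h3
    rw [hlow] at h4
    simp only [not_exists, not_and, not_not] at h4
    have hn : ¬ text.toList = [] := fun h => h1 (by
      simp only [Bool.or_eq_true]; exact Or.inl (Or.inl (List.isEmpty_iff.mpr h)))
    have hh : ¬ text.toList.head? = some '_' := fun h => h1 (by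
      simp only [Bool.or_eq_true]; exact Or.inl (Or.inr (hs.mpr h)))
    have hl : ¬ text.toList.getLast? = some '_' := fun h => h1 (by
      simp only [Bool.or_eq_true]; exact Or.inr (he.mpr h))
    constructor
    · intro _
      refine ⟨hn, hh, hl, h2, fun c hc => ⟨?_, h4 c hc⟩⟩
      have hcu := h3 c hc
      cases hcv : PySem.Chars.isupper c
      · rfl
      · exact absurd hcv hcu
    · intro _; rfl

-- per-character bridge on the ASCII domain
set_option maxRecDepth 100000 in
theorem pvChar_bridge (c : Char) (h : pvDomChar c = true) :
    (PySem.Chars.isupper c = false ∧ PySem.Chars.lowerChar c ∈ pvSnakeChars) ↔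
      (c = '_' ∨ c ∈ pvLcd) := by
  have hd : c.toNat < 127 := by
    simp only [pvDomChar, Bool.or_eq_true, Bool.and_eq_true, decide_eq_true_eq, beq_iff_eq] at h
    omega
  have key : ∀ n : Nat, n < 127 → pvDomChar (Char.ofNat n) = true →
      ((PySem.Chars.isupper (Char.ofNat n) = false ∧
        PySem.Chars.lowerChar (Char.ofNat n) ∈ pvSnakeChars) ↔
       (Char.ofNat n = '_' ∨ Char.ofNat n ∈ pvLcd)) := by decide
  have := key c.toNat hd (by rwa [Char.ofNat_toNat])
  rwa [Char.ofNat_toNat] at this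

-- ===== VERDICT (by name: the statement is the Claim_ definition above) =====
theorem is_snake_case_py_spec : Claim_equal_is_snake_case_py := by
  intro text hdom
  unfold Spec_is_snake_case_py
  rw [Bool.eq_iff_iff, is_snake_case_py_iff]
  unfold is_snake_case_py_alt
  rw [pvAltGo_iff]
  have hdc : ∀ c ∈ text.toList, pvDomChar c = true := by
    have h := hdom
    unfold Dom_is_snake_case_py pvDomStr at h
    simp only [List.all_eq_true] at h
    exact h
  constructor
  · rintro ⟨hn, hh, hl, hi, hch⟩
    exact ⟨fun c hc => (pvChar_bridge c (hdc c hc)).mp (hch c hc), hi, fun _ => hh, hl,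
      fun h => (hn h).elim⟩
  · rintro ⟨hch, hi, hh, hl, hn⟩
    refine ⟨fun h => Bool.noConfusion (hn h), hh rfl, hl, hi,
      fun c hc => (pvChar_bridge c (hdc c hc)).mpr (hch c hc)⟩
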